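-- pv_equiv track=rewrite | github.com/natalka1122/advent_of_code | 2015/15/main1.py | f
-- ===== SOURCE A (Python) =====
-- def f(
--     recipe: tuple[str, ...], ingredients: dict[str, tuple[int, int, int, int, int]]
-- ) -> int:
--     capacity, durability, flavor, texture = 0, 0, 0, 0
--     for ingredient in recipe:
--         capacity += ingredients[ingredient][0]
--         durability += ingredients[ingredient][1]
--         flavor += ingredients[ingredient][2]
--         texture += ingredients[ingredient][3]
--     capacity = max(0, capacity)
--     durability = max(0, durability)
--     flavor = max(0, flavor)
--     texture = max(0, texture)
--     return capacity * durability * flavor * texture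
-- ===== SOURCE B (Python) =====
-- def f(recipe, ingredients):
--     # Build a frequency table of the recipe, then take one weighted pass
--     # over the distinct ingredients per property instead of accumulating
--     # four running sums over every recipe entry.
--     cnt = {}
--     for ing in recipe:
--         cnt[ing] = cnt.get(ing, 0) + 1
--     capacity = sum(c * ingredients[ing][0] for ing, c in cnt.items())
--     durability = sum(c * ingredients[ing][1] for ing, c in cnt.items())
--     flavor = sum(c * ingredients[ing][2] for ing, c in cnt.items())
--     texture = sum(c * ingredients[ing][3] for ing, c in cnt.items())
--     return max(0, capacity) * max(0, durability) * max(0, flavor) * max(0, texture)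
-- ===== Notes on version B (the rewrite author's own statement) =====
-- stated objective: alternative
-- what changed: B first builds a frequency table of the recipe and then sums each property once over the distinct ingredients weighted by multiplicity, instead of A's single pass over every recipe entry maintaining four running sums.
import Mathlib
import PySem

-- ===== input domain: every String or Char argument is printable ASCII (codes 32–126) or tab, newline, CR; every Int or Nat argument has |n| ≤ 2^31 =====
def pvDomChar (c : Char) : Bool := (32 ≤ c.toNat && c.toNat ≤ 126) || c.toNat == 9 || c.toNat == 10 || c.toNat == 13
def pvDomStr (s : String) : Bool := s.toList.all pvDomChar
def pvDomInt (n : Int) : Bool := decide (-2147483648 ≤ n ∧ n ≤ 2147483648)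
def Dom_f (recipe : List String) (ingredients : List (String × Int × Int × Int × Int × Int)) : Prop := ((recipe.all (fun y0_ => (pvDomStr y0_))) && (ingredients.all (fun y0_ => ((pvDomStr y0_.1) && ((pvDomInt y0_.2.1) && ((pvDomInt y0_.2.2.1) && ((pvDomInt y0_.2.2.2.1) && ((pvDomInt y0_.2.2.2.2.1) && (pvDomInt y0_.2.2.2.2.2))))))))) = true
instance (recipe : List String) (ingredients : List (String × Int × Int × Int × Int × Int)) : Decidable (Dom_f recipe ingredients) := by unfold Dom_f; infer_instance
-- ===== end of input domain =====

-- B builds a frequency table of the recipe first and sums each property once over the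
-- distinct ingredients weighted by multiplicity (alternative decomposition, same cost).

-- shared dict lookup: ingredients[ingredient]; default never reached under Pre_f
def lookup5 (ingredients : List (String × Int × Int × Int × Int × Int)) (k : String) : Int × Int × Int × Int × Int :=
  PySem.Dict.getD (PySem.Dict.mk ingredients) k (0, 0, 0, 0, 0)

-- ===== PORT A =====
def f (recipe : List String) (ingredients : List (String × Int × Int × Int × Int × Int)) : Int :=
  let t : Int × Int × Int × Int :=
    recipe.foldl (fun acc ing =>
      let v := lookup5 ingredients ing
      (acc.1 + v.1, acc.2.1 + v.2.1, acc.2.2.1 + v.2.2.1, acc.2.2.2 + v.2.2.2.1)) (0, 0, 0, 0)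
  max 0 t.1 * max 0 t.2.1 * max 0 t.2.2.1 * max 0 t.2.2.2

-- ===== PORT B =====
def f_alt (recipe : List String) (ingredients : List (String × Int × Int × Int × Int × Int)) : Int :=
  let cnt : PySem.Dict String Int :=
    recipe.foldl (fun d x => PySem.Dict.insert d x (PySem.Dict.getD d x 0 + 1)) PySem.Dict.empty
  let capacity := cnt.items.foldl (fun s p => s + p.2 * (lookup5 ingredients p.1).1) 0
  let durability := cnt.items.foldl (fun s p => s + p.2 * (lookup5 ingredients p.1).2.1) 0
  let flavor := cnt.items.foldl (fun s p => s + p.2 * (lookup5 ingredients p.1).2.2.1) 0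
  let texture := cnt.items.foldl (fun s p => s + p.2 * (lookup5 ingredients p.1).2.2.2.1) 0
  max 0 capacity * max 0 durability * max 0 flavor * max 0 texture

-- ===== PRECONDITION & SPEC =====
-- Pre_f: every recipe entry is a key of ingredients; on a missing key Python A (and B) raise KeyError.
def Pre_f (recipe : List String) (ingredients : List (String × Int × Int × Int × Int × Int)) : Prop :=
  (recipe.all (fun r => ingredients.any (fun p => p.1 == r))) = true
instance (recipe : List String) (ingredients : List (String × Int × Int × Int × Int × Int)) : Decidable (Pre_f recipe ingredients) := by unfold Pre_f; infer_instance
def pvWitness_f : List String × (List (String × Int × Int × Int × Int × Int)) :=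
  (["a", "b", "a"], [("a", 1, 2, 3, 4, 5), ("b", -1, 0, 2, 1, 0)])

def Spec_f (recipe : List String) (ingredients : List (String × Int × Int × Int × Int × Int)) (out : Int) : Prop := out = f_alt recipe ingredients
instance (recipe : List String) (ingredients : List (String × Int × Int × Int × Int × Int)) (out : Int) : Decidable (Spec_f recipe ingredients out) := by unfold Spec_f; infer_instance

-- ===== CLAIM (what is proved, stated in full; the proofs are below) =====
def Claim_equal_f : Prop := ∀ (recipe : List String) (ingredients : List (String × Int × Int × Int × Int × Int)), Dom_f recipe ingredients → Pre_f recipe ingredients → Spec_f recipe ingredients (f recipe ingredients)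

-- ===== LEMMAS AND PROOFS =====

-- A's accumulating fold, characterised componentwise.
lemma foldA_eq (ingredients : List (String × Int × Int × Int × Int × Int)) :
    ∀ (l : List String) (a b c d : Int),
      l.foldl (fun (acc : Int × Int × Int × Int) ing =>
        let v := lookup5 ingredients ing
        (acc.1 + v.1, acc.2.1 + v.2.1, acc.2.2.1 + v.2.2.1, acc.2.2.2 + v.2.2.2.1)) (a, b, c, d)
      = (a + (l.map (fun i => (lookup5 ingredients i).1)).sum,
         b + (l.map (fun i => (lookup5 ingredients i).2.1)).sum,
         c + (l.map (fun i => (lookup5 ingredients i).2.2.1)).sum,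
         d + (l.map (fun i => (lookup5 ingredients i).2.2.2.1)).sum) := by
  intro l
  induction l with
  | nil => intro a b c d; simp
  | cons x t ih =>
      intro a b c d
      simp only [List.foldl_cons, List.map_cons, List.sum_cons, ih]
      refine Prod.ext (by ring) (Prod.ext (by ring) (Prod.ext (by ring) (by ring)))

-- a weighted sum over the counter's distinct keys equals the plain sum over the list
lemma counter_weighted_sum (l : List String) (g : String → Int) :
    (((PySem.Dict.counter l).items).map (fun p : String × Int => p.2 * g p.1)).sum
      = (l.map g).sum := by
  rw [PySem.Dict.items_counter, List.map_map]
  have hfin : (PySem.Set.ofList l).toFinset = l.toFinset := by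
    ext x; simp [PySem.Set.mem_ofList]
  calc ((PySem.Set.ofList l).map ((fun p : String × Int => p.2 * g p.1) ∘ fun k => (k, (l.count k : Int)))).sum
      = ∑ x ∈ (PySem.Set.ofList l).toFinset, (l.count x : Int) * g x := by
        rw [List.sum_toFinset _ (PySem.Set.nodup_ofList l)]; rfl
    _ = ∑ x ∈ l.toFinset, (l.count x : Int) * g x := by rw [hfin]
    _ = (l.map g).sum := by
        rw [Finset.sum_list_map_count l g]
        simp

lemma foldl_weight (items : List (String × Int)) (g : String → Int) (a : Int) :
    items.foldl (fun s p => s + p.2 * g p.1) a = a + (items.map (fun p => p.2 * g p.1)).sum := by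
  simpa using PySem.List.foldl_add (l := items) (g := fun p : String × Int => p.2 * g p.1) (a := a)

-- ===== VERDICT (by name: the statement is the Claim_ definition above) =====
theorem f_spec : Claim_equal_f := by
  intro recipe ingredients _ _
  unfold Spec_f f f_alt
  rw [PySem.Dict.foldl_insert_getD_add_one_eq_counter]
  rw [foldA_eq]
  dsimp only
  rw [foldl_weight _ (fun k => (lookup5 ingredients k).1) 0,
      foldl_weight _ (fun k => (lookup5 ingredients k).2.1) 0,
      foldl_weight _ (fun k => (lookup5 ingredients k).2.2.1) 0,
      foldl_weight _ (fun k => (lookup5 ingredients k).2.2.2.1) 0,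
      counter_weighted_sum recipe (fun k => (lookup5 ingredients k).1),
      counter_weighted_sum recipe (fun k => (lookup5 ingredients k).2.1),
      counter_weighted_sum recipe (fun k => (lookup5 ingredients k).2.2.1),
      counter_weighted_sum recipe (fun k => (lookup5 ingredients k).2.2.2.1)]
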